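-- pv_equiv track=rewrite | github.com/hojak/py_advent_2025 | src/day3/highest_joltage.py | highest_joltage
-- ===== SOURCE A (Python) =====
-- def highest_joltage(bank: str) -> int:
--     largest_first = 0
--     index_of_first = 0
--
--     for first_index in range(0, len(bank)-1):
--         int_at_first = int(bank[first_index])
--         if (int_at_first > largest_first):
--             largest_first = int_at_first
--             index_of_first = first_index
--
--     largest_second = 0
--     for second_index in range(index_of_first+1, len(bank)):
--         int_at_second = int(bank[second_index])
--         if (int_at_second > largest_second):
--             largest_second = int_at_second
--
--     return largest_first * 10 + largest_second
-- ===== SOURCE B (Python) =====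
-- def highest_joltage(bank: str) -> int:
--     if len(bank) < 2:
--         return 0
--     digits = [int(c) for c in bank]
--     best = 0
--     suffix = digits[-1]
--     for d in reversed(digits[:-1]):
--         best = max(best, d * 10 + suffix)
--         suffix = max(suffix, d)
--     return best
-- ===== Notes on version B (the rewrite author's own statement) =====
-- stated objective: alternative
-- what changed: A makes two dependent left-to-right index scans (find the greedy largest first digit and its first index, then rescan the suffix after it); B makes a single right-to-left pass maintaining a running suffix maximum and combines each digit with the best digit to its right, which yields the same global maximum of 10*d[i]+d[j] over i<j.
import Mathlib
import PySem

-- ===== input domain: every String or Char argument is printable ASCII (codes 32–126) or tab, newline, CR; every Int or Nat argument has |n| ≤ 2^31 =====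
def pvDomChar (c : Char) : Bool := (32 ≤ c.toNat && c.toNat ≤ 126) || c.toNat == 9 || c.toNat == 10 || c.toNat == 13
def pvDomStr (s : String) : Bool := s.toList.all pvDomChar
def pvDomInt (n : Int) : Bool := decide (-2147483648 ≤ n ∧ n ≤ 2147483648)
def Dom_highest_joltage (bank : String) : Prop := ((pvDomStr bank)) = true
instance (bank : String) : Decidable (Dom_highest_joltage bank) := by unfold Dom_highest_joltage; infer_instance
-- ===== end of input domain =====

-- B replaces A's two dependent left-to-right scans (find first greedy max, then rescan the suffix)
-- by one right-to-left pass maintaining a running suffix maximum; same return value on Pre_ (alternative decomposition).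

-- shared primitive: Python int(c) for one character; none (ValueError, non-digit char) is excluded
-- by Pre_highest_joltage, so the .getD 0 default is never reached on admitted inputs
def intAt (c : Char) : Int := (PySem.Int.ofChars? [c]).getD 0

-- ===== PORT A =====
-- first loop body: track (largest_first, index_of_first)
def stepA1 (l : List Char) (st : Int × Int) (i : Int) : Int × Int :=
  let v := intAt (PySem.List.pyGetD l i ' ')
  if v > st.1 then (v, i) else st

-- second loop body: track largest_second
def stepA2 (l : List Char) (acc : Int) (i : Int) : Int :=
  let v := intAt (PySem.List.pyGetD l i ' ')
  if v > acc then v else acc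

def highest_joltage (bank : String) : Int :=
  let l := bank.toList
  let n : Int := l.length
  let fi := (PySem.List.pyRange 0 (n - 1) 1).foldl (stepA1 l) (0, 0)
  let s := (PySem.List.pyRange (fi.2 + 1) n 1).foldl (stepA2 l) 0
  fi.1 * 10 + s

-- ===== PORT B =====
-- loop body of Source B: (best, suffix) updated with the next digit to the left
def stepB (st : Int × Int) (d : Int) : Int × Int := (max st.1 (d * 10 + st.2), max st.2 d)

def highest_joltage_alt (bank : String) : Int :=
  let l := bank.toList
  if l.length < 2 then 0
  else
    let digits := l.map intAt
    ((digits.dropLast.reverse).foldl stepB (0, (PySem.List.pyGet? digits (-1)).getD 0)).1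

-- ===== PRECONDITION & SPEC =====
-- Pre_ excludes exactly the inputs where Python A raises ValueError: length ≥ 2 with some
-- non-digit character (A calls int() on every position then).  Both A and B raise there.
def Pre_highest_joltage (bank : String) : Prop :=
  bank.toList.length < 2 ∨ bank.toList.all (fun c => c.isDigit) = true
instance (bank : String) : Decidable (Pre_highest_joltage bank) := by
  unfold Pre_highest_joltage; infer_instance

def pvWitness_highest_joltage : String := "39"

def Spec_highest_joltage (bank : String) (out : Int) : Prop := out = highest_joltage_alt bank
instance (bank : String) (out : Int) : Decidable (Spec_highest_joltage bank out) := by unfold Spec_highest_joltage; infer_instance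

-- ===== CLAIM (what is proved, stated in full; the proofs are below) =====
def Claim_equal_highest_joltage : Prop := ∀ (bank : String), Dom_highest_joltage bank → Pre_highest_joltage bank → Spec_highest_joltage bank (highest_joltage bank)

-- ===== LEMMAS AND PROOFS =====

-- max of a list of ints with floor 0 (the running-max both loops compute, for non-negative digits)
def mxI (t : List Int) : Int := t.foldl max 0

-- best two-digit value 10*t[i]+t[j] over i<j, floor 0 (the common meeting point of A and B)
def pm : List Int → Int
  | [] => 0
  | [_] => 0
  | a :: b :: t => max (10 * a + mxI (b :: t)) (pm (b :: t))

-- digit value at Nat index k (what both programs read at position k inside Pre_)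
def dA (l : List Char) (k : Nat) : Int := intAt (l.getD k ' ')

lemma intAt_digit {c : Char} (h : c.isDigit = true) : intAt c = (c.toNat : Int) - 48 := by
  unfold Char.isDigit at h
  simp at h
  have h48 : 48 ≤ c.toNat ∧ c.toNat ≤ 57 := by
    obtain ⟨h1, h2⟩ := h
    exact ⟨UInt32.le_iff_toNat_le.mp h1, UInt32.le_iff_toNat_le.mp h2⟩
  have hcs : c.toNat = 48 ∨ c.toNat = 49 ∨ c.toNat = 50 ∨ c.toNat = 51 ∨ c.toNat = 52 ∨ c.toNat = 53 ∨ c.toNat = 54 ∨ c.toNat = 55 ∨ c.toNat = 56 ∨ c.toNat = 57 := by omega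
  have hc : ∀ n, c.toNat = n → c = Char.ofNat n := by
    intro n hn; subst hn; exact (Char.ofNat_toNat c).symm
  rcases hcs with h|h|h|h|h|h|h|h|h|h <;> rw [hc _ h] <;> decide

lemma intAt_digit_bounds {c : Char} (h : c.isDigit = true) : 0 ≤ intAt c ∧ intAt c ≤ 9 := by
  rw [intAt_digit h]
  unfold Char.isDigit at h
  simp at h
  have h48 : 48 ≤ c.toNat ∧ c.toNat ≤ 57 := by
    obtain ⟨h1, h2⟩ := h
    exact ⟨UInt32.le_iff_toNat_le.mp h1, UInt32.le_iff_toNat_le.mp h2⟩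
  omega

lemma foldl_max_shift (t : List Int) : ∀ x y, t.foldl max (max x y) = max y (t.foldl max x) := by
  induction t with
  | nil => intro x y; simp [max_comm]
  | cons a t ih =>
    intro x y
    simp only [List.foldl]
    rw [max_right_comm, ih]

lemma mx_cons (a : Int) (t : List Int) : mxI (a :: t) = max a (mxI t) := by
  unfold mxI
  simpa using foldl_max_shift t 0 a

lemma mx_nonneg (t : List Int) : 0 ≤ mxI t := by
  induction t with
  | nil => simp [mxI]
  | cons a t ih => rw [mx_cons]; exact le_trans ih (le_max_right _ _)

lemma le_mx {x : Int} {t : List Int} (h : x ∈ t) : x ≤ mxI t := by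
  induction t with
  | nil => cases h
  | cons a t ih =>
    rw [mx_cons]
    rcases List.mem_cons.mp h with h | h
    · subst h; exact le_max_left _ _
    · exact le_trans (ih h) (le_max_right _ _)

lemma mx_mem_or (t : List Int) : mxI t = 0 ∨ mxI t ∈ t := by
  induction t with
  | nil => left; rfl
  | cons a t ih =>
    rw [mx_cons]
    rcases le_total a (mxI t) with h | h
    · rw [max_eq_right h]
      rcases ih with h0 | hm
      · left; exact h0
      · right; exact List.mem_cons_of_mem _ hm
    · rw [max_eq_left h]
      right; exact List.mem_cons_self

lemma pm_cons {a : Int} {t : List Int} (h : t ≠ []) :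
    pm (a :: t) = max (10 * a + mxI t) (pm t) := by
  cases t with
  | nil => exact absurd rfl h
  | cons b t => rfl

lemma pm_pair_le : ∀ (t : List Int) (i j : Nat), i < j → j < t.length →
    10 * t.getD i 0 + t.getD j 0 ≤ pm t := by
  intro t
  induction t with
  | nil => intro i j hij hj; simp at hj
  | cons a t ih =>
    intro i j hij hj
    have ht : t ≠ [] := by
      intro h; subst h; simp at hj; omega
    rw [pm_cons ht]
    cases i with
    | zero =>
      have hj1 : j - 1 < t.length := by simp at hj; omega
      have hgd : (a :: t).getD j 0 = t.getD (j - 1) 0 := by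
        cases j with
        | zero => omega
        | succ j' => simp
      have hmem : t.getD (j - 1) 0 ∈ t := by
        rw [List.getD_eq_getElem t 0 hj1]
        exact List.getElem_mem hj1
      have := le_mx hmem
      have : (a :: t).getD j 0 ≤ mxI t := by rw [hgd]; exact this
      refine le_trans ?_ (le_max_left _ _)
      simp only [List.getD_cons_zero]
      omega
    | succ i' =>
      cases j with
      | zero => omega
      | succ j' =>
        have := ih i' j' (by omega) (by simp at hj; omega)
        simp only [List.getD_cons_succ]
        exact le_trans this (le_max_right _ _)

lemma pm_le_of {t : List Int} {c : Int} (h0 : ∀ x ∈ t, 0 ≤ x) (hc : 0 ≤ c)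
    (hub : ∀ i j : Nat, i < j → j < t.length → 10 * t.getD i 0 + t.getD j 0 ≤ c) :
    pm t ≤ c := by
  induction t with
  | nil => simpa [pm]
  | cons a t ih =>
    cases t with
    | nil => simpa [pm]
    | cons b t =>
      rw [pm_cons (by simp)]
      apply max_le
      · rcases mx_mem_or (b :: t) with hz | hm
        · have hb : 0 ≤ b := h0 b (by simp)
          have := hub 0 1 (by omega) (by simp)
          simp only [List.getD_cons_zero, List.getD_cons_succ] at this
          rw [hz]; omega
        · obtain ⟨k, hk, hke⟩ := List.mem_iff_getElem.mp hm
          have := hub 0 (k + 1) (by omega) (by simpa using hk)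
          simp only [List.getD_cons_zero, List.getD_cons_succ] at this
          rw [List.getD_eq_getElem (b :: t) 0 (by simpa using hk), hke] at this
          omega
      · apply ih (fun x hx => h0 x (by simp [hx]))
        intro i j hij hj
        have := hub (i + 1) (j + 1) (by omega) (by simp at hj ⊢; omega)
        simpa using this

-- B's foldr over a prefix with the last digit as initial suffix computes (pm, mxI) of the whole list
lemma bfold (t : List Int) (z : Int) (h0 : ∀ x ∈ t, 0 ≤ x) (hz : 0 ≤ z) :
    t.foldr (fun a st => stepB st a) (0, z) = (pm (t ++ [z]), mxI (t ++ [z])) := by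
  induction t with
  | nil =>
    simp [pm, mxI, stepB]
    omega
  | cons a t ih =>
    have ih' := ih (fun x hx => h0 x (by simp [hx]))
    rw [List.foldr_cons, ih']
    have hne : t ++ [z] ≠ [] := by simp
    rw [List.cons_append, pm_cons hne, mx_cons]
    simp only [stepB, Prod.mk.injEq]
    constructor
    · rw [max_comm, mul_comm]
    · rw [max_comm]

-- first-loop invariant: after scanning positions [0, m), st = (largest so far with floor 0,
-- index of its first occurrence)
lemma loop1_inv (l : List Char) (hdig : ∀ c ∈ l, c.isDigit = true) :
    ∀ m : Nat, m ≤ l.length →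
      (0 ≤ ((PySem.List.pyRange 0 (m : Int) 1).foldl (stepA1 l) (0, 0)).1) ∧
      (0 ≤ ((PySem.List.pyRange 0 (m : Int) 1).foldl (stepA1 l) (0, 0)).2) ∧
      (0 < m → ((PySem.List.pyRange 0 (m : Int) 1).foldl (stepA1 l) (0, 0)).2.toNat < m ∧
        dA l ((PySem.List.pyRange 0 (m : Int) 1).foldl (stepA1 l) (0, 0)).2.toNat
          = ((PySem.List.pyRange 0 (m : Int) 1).foldl (stepA1 l) (0, 0)).1) ∧
      (∀ k, k < m → dA l k ≤ ((PySem.List.pyRange 0 (m : Int) 1).foldl (stepA1 l) (0, 0)).1) ∧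
      (∀ k, k < ((PySem.List.pyRange 0 (m : Int) 1).foldl (stepA1 l) (0, 0)).2.toNat →
        dA l k < ((PySem.List.pyRange 0 (m : Int) 1).foldl (stepA1 l) (0, 0)).1) := by
  intro m
  induction m with
  | zero =>
    intro _
    rw [show ((0 : Nat) : Int) = 0 by rfl, PySem.List.pyRange_one_eq_nil (le_refl 0)]
    refine ⟨le_refl _, le_refl _, by omega, by omega, by simp⟩
  | succ m ih =>
    intro hm1
    have hm : m ≤ l.length := by omega
    have hml : m < l.length := by omega
    obtain ⟨h1, h2, h3, h4, h5⟩ := ih hm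
    have hsplit : PySem.List.pyRange 0 ((m + 1 : Nat) : Int) 1
        = PySem.List.pyRange 0 (m : Int) 1 ++ [(m : Int)] := by
      push_cast
      exact PySem.List.pyRange_one_succ_right (by positivity)
    rw [hsplit, List.foldl_append]
    set st := (PySem.List.pyRange 0 (m : Int) 1).foldl (stepA1 l) (0, 0) with hst
    have hmem : l.getD m ' ' ∈ l := by
      rw [List.getD_eq_getElem l ' ' hml]; exact List.getElem_mem hml
    have hvb := intAt_digit_bounds (hdig _ hmem)
    have hv : PySem.List.pyGetD l ((m : Nat) : Int) ' ' = l.getD m ' ' :=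
      PySem.List.pyGetD_natCast l m ' '
    simp only [List.foldl_cons, List.foldl_nil, stepA1, hv]
    by_cases hgt : dA l m > st.1
    · rw [if_pos (by exact hgt)]
      refine ⟨hvb.1, by positivity, ?_, ?_, ?_⟩
      · intro _
        simp only [Int.toNat_natCast]
        exact ⟨by omega, rfl⟩
      · intro k hk
        simp only
        rcases Nat.lt_succ_iff_lt_or_eq.mp hk with hk | hk
        · exact le_of_lt (lt_of_le_of_lt (h4 k hk) hgt)
        · subst hk; exact le_refl _
      · intro k hk
        simp only [Int.toNat_natCast] at hk ⊢
        exact lt_of_le_of_lt (h4 k hk) hgt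
    · rw [if_neg (by exact hgt)]
      have hvle : dA l m ≤ st.1 := by omega
      refine ⟨h1, h2, ?_, ?_, h5⟩
      · intro _
        by_cases hm0 : 0 < m
        · obtain ⟨ha, hb⟩ := h3 hm0
          exact ⟨by omega, hb⟩
        · have hm00 : m = 0 := by omega
          have hst0 : st = (0, 0) := by
            rw [hst, hm00]
            rw [show ((0 : Nat) : Int) = 0 by rfl, PySem.List.pyRange_one_eq_nil (le_refl 0)]
            rfl
          rw [hst0]
          subst hm00
          simp only [Int.toNat_zero]
          constructor
          · omega
          · have h0le : dA l 0 ≤ 0 := by rw [hst0] at hvle; exact hvle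
            unfold dA at h0le ⊢
            omega
      · intro k hk
        rcases Nat.lt_succ_iff_lt_or_eq.mp hk with hk | hk
        · exact h4 k hk
        · subst hk; exact hvle

lemma ds_getD (l : List Char) {k : Nat} (hk : k < l.length) :
    (l.map intAt).getD k 0 = dA l k := by
  rw [List.getD_eq_getElem _ _ (by simpa using hk), List.getElem_map]
  unfold dA
  rw [List.getD_eq_getElem _ _ hk]

lemma ds_bounds (l : List Char) (hdig : ∀ c ∈ l, c.isDigit = true) :
    ∀ x ∈ l.map intAt, 0 ≤ x ∧ x ≤ 9 := by
  intro x hx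
  obtain ⟨c, hc, rfl⟩ := List.mem_map.mp hx
  exact intAt_digit_bounds (hdig c hc)

lemma dA_bounds (l : List Char) (hdig : ∀ c ∈ l, c.isDigit = true) {k : Nat}
    (hk : k < l.length) : 0 ≤ dA l k ∧ dA l k ≤ 9 := by
  unfold dA
  have hmem : l.getD k ' ' ∈ l := by
    rw [List.getD_eq_getElem l ' ' hk]; exact List.getElem_mem hk
  exact intAt_digit_bounds (hdig _ hmem)

-- the greedy pair (largest first digit, then largest digit after its first occurrence)
-- attains pm, the best two-digit value over all ordered pairs
lemma combine (l : List Char) (hdig : ∀ c ∈ l, c.isDigit = true) (hlen : 2 ≤ l.length)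
    (f : Int) (i0t : Nat)
    (hi0 : i0t < l.length - 1) (hf : dA l i0t = f)
    (hub : ∀ k, k < l.length - 1 → dA l k ≤ f)
    (hstrict : ∀ k, k < i0t → dA l k < f) :
    10 * f + mxI ((l.map intAt).drop (i0t + 1)) = pm (l.map intAt) := by
  have hdl : (l.map intAt).length = l.length := List.length_map ..
  have hsnn : 0 ≤ mxI ((l.map intAt).drop (i0t + 1)) := mx_nonneg _
  have hbd := ds_bounds l hdig
  have hfnn : 0 ≤ f := hf ▸ (dA_bounds l hdig (by omega)).1
  have hdropD : ∀ j : Nat, i0t + 1 ≤ j → j < l.length →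
      (l.map intAt).getD j 0 ≤ mxI ((l.map intAt).drop (i0t + 1)) := by
    intro j h1 h2
    have hjd : j - (i0t + 1) < ((l.map intAt).drop (i0t + 1)).length := by
      rw [List.length_drop, hdl]; omega
    have heq : (l.map intAt).getD j 0 = ((l.map intAt).drop (i0t + 1))[j - (i0t + 1)] := by
      rw [List.getElem_drop, List.getD_eq_getElem _ _ (by omega : j < (l.map intAt).length)]
      congr 1; omega
    rw [heq]
    exact le_mx (List.getElem_mem hjd)
  apply le_antisymm
  · rcases mx_mem_or ((l.map intAt).drop (i0t + 1)) with hz | hm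
    · have hple := pm_pair_le (l.map intAt) i0t (l.length - 1) (by omega) (by omega)
      have hlast : (l.map intAt).getD (l.length - 1) 0 = 0 := by
        have h1 := hdropD (l.length - 1) (by omega) (by omega)
        rw [hz] at h1
        have h2 : 0 ≤ (l.map intAt).getD (l.length - 1) 0 := by
          rw [List.getD_eq_getElem _ _ (by omega)]
          exact (hbd _ (List.getElem_mem _)).1
        omega
      rw [ds_getD l (by omega : i0t < l.length), hf, hlast] at hple
      rw [hz]
      omega
    · obtain ⟨k, hk, hke⟩ := List.mem_iff_getElem.mp hm
      have hkl : i0t + 1 + k < l.length := by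
        rw [List.length_drop, hdl] at hk; omega
      have hgj : (l.map intAt).getD (i0t + 1 + k) 0 = mxI ((l.map intAt).drop (i0t + 1)) := by
        rw [List.getD_eq_getElem _ _ (by omega : i0t + 1 + k < (l.map intAt).length)]
        rw [← List.getElem_drop (h := hk)]
        exact hke
      have hple := pm_pair_le (l.map intAt) i0t (i0t + 1 + k) (by omega) (by omega)
      rw [ds_getD l (by omega : i0t < l.length), hf, hgj] at hple
      exact hple
  · apply pm_le_of (fun x hx => (hbd x hx).1) (by omega)
    intro i j hij hj
    rw [hdl] at hj
    have hil : i < l.length := by omega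
    rw [ds_getD l hil, ds_getD l hj]
    have hdi : dA l i ≤ f := hub i (by omega)
    rcases eq_or_lt_of_le hdi with he | hlt
    · have hge : i0t ≤ i := by
        by_contra hcon
        exact absurd he (ne_of_lt (hstrict i (by omega)))
      have hjs : dA l j ≤ mxI ((l.map intAt).drop (i0t + 1)) := by
        rw [← ds_getD l hj]
        exact hdropD j (by omega) hj
      omega
    · have hdj9 : dA l j ≤ 9 := (dA_bounds l hdig hj).2
      omega

-- A's result on a digit string of length ≥ 2 is pm of the digit list
lemma a_eq_pm (bank : String) (hdig : ∀ c ∈ bank.toList, c.isDigit = true)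
    (hlen : 2 ≤ bank.toList.length) :
    highest_joltage bank = pm (bank.toList.map intAt) := by
  unfold highest_joltage
  simp only []
  have hcast : (bank.toList.length : Int) - 1 = ((bank.toList.length - 1 : Nat) : Int) := by
    omega
  rw [hcast]
  obtain ⟨h1, h2, h3, h4, h5⟩ :=
    loop1_inv bank.toList hdig (bank.toList.length - 1) (by omega)
  obtain ⟨hi0, hf⟩ := h3 (by omega)
  set st := (PySem.List.pyRange 0 ((bank.toList.length - 1 : Nat) : Int) 1).foldl
      (stepA1 bank.toList) (0, 0) with hst
  have hstep : stepA2 bank.toList = fun acc j =>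
      (fun acc c => if intAt c > acc then intAt c else acc) acc
        (PySem.List.pyGetD bank.toList j ' ') := rfl
  rw [hstep,
    PySem.List.foldl_pyRange_pyGetD' bank.toList ' '
      (fun acc c => if intAt c > acc then intAt c else acc) 0 (by omega : (0:Int) ≤ st.2 + 1)]
  have htn : (st.2 + 1).toNat = st.2.toNat + 1 := by omega
  rw [htn]
  have hfold : ∀ cs : List Char,
      cs.foldl (fun acc c => if intAt c > acc then intAt c else acc) 0 = mxI (cs.map intAt) := by
    intro cs
    unfold mxI
    rw [List.foldl_map]
    congr 1
    funext a c
    rw [max_def]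
    split_ifs <;> omega
  rw [hfold, List.map_drop, mul_comm]
  exact combine bank.toList hdig hlen st.1 st.2.toNat hi0 hf h4 h5

-- B's result on a digit string of length ≥ 2 is pm of the digit list
lemma b_eq_pm (bank : String) (hdig : ∀ c ∈ bank.toList, c.isDigit = true)
    (hlen : 2 ≤ bank.toList.length) :
    highest_joltage_alt bank = pm (bank.toList.map intAt) := by
  unfold highest_joltage_alt
  simp only []
  rw [if_neg (Nat.not_lt.mpr hlen)]
  have hne : bank.toList.map intAt ≠ [] := by
    simp only [ne_eq, List.map_eq_nil_iff]
    intro h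
    rw [h] at hlen
    simp at hlen
  rw [PySem.List.pyGet?_neg_one, List.getLast?_eq_some_getLast hne, Option.getD_some,
    List.foldl_reverse]
  have hbd := ds_bounds bank.toList hdig
  rw [bfold (bank.toList.map intAt).dropLast ((bank.toList.map intAt).getLast hne)
    (fun x hx => (hbd x (List.mem_of_mem_dropLast hx)).1)
    (hbd _ (List.getLast_mem hne)).1]
  rw [List.dropLast_append_getLast hne]

-- both return 0 on strings of length < 2
lemma short_case (bank : String) (h : bank.toList.length < 2) :
    highest_joltage bank = 0 ∧ highest_joltage_alt bank = 0 := by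
  have h0 : bank.toList = [] ∨ ∃ c, bank.toList = [c] := by
    cases hl : bank.toList with
    | nil => exact Or.inl rfl
    | cons c t =>
      cases t with
      | nil => exact Or.inr ⟨c, rfl⟩
      | cons d t' => rw [hl] at h; simp at h
  rcases h0 with hl | ⟨c, hl⟩ <;>
    constructor <;>
      simp [highest_joltage, highest_joltage_alt, hl, PySem.List.pyRange_one_eq_nil]

-- ===== VERDICT (by name: the statement is the Claim_ definition above) =====
theorem highest_joltage_spec : Claim_equal_highest_joltage := by
  intro bank _ hpre
  unfold Spec_highest_joltage
  by_cases hlen : bank.toList.length < 2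
  · obtain ⟨ha, hb⟩ := short_case bank hlen
    rw [ha, hb]
  · have hdig : ∀ c ∈ bank.toList, c.isDigit = true := by
      rcases hpre with h | h
      · exact absurd h hlen
      · intro c hc
        exact List.all_eq_true.mp h c hc
    rw [a_eq_pm bank hdig (by omega), b_eq_pm bank hdig (by omega)]
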